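-- pv_equiv track=rewrite | github.com/Cho-El/Python-coding-test-practice | 프로그래머스 문제/파이썬/2022 하반기 신입 라인 코딩테스트/1.py | solution
-- ===== SOURCE A (Python) =====
-- from typing import List
--
-- def solution(queries: List[List[int]]) -> int:
--     answer = 0
--     array_dic = {}
--     for q in queries:
--         arr_num,add_cnt = q
--         if arr_num in array_dic:
--             Element, max_array = array_dic[arr_num]
--             if Element + add_cnt > max_array:
--                 answer += Element
--                 new_arr_size = 1
--                 while Element + add_cnt > new_arr_size :
--                     new_arr_size *= 2
--                 array_dic[arr_num][1] = new_arr_size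
--                 array_dic[arr_num][0] += add_cnt
--             else:
--                 array_dic[arr_num][0] += add_cnt
--         else:
--             new_arr_size = 1
--             while add_cnt > new_arr_size:
--                 new_arr_size *= 2
--             array_dic[arr_num] = [add_cnt, new_arr_size]
--
--     return answer
-- ===== SOURCE B (Python) =====
-- from typing import List
--
-- def solution(queries: List[List[int]]) -> int:
--     # Stage 1: group the add counts per array number (insertion order of first appearance).
--     groups = {}
--     for arr_num, add_cnt in queries:
--         groups.setdefault(arr_num, []).append(add_cnt)
--     # Stage 2: replay each array independently, keeping only its running total;
--     # the capacity is derived in closed form as the next power of two of the total.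
--     answer = 0
--     for adds in groups.values():
--         total = 0
--         for a in adds:
--             if total + a > 1 << max(total - 1, 0).bit_length():
--                 answer += total
--             total += a
--     return answer
-- ===== Notes on version B (the rewrite author's own statement) =====
-- stated objective: alternative
-- what changed: B is a staged two-pass algorithm: it first groups the add counts per array number into a dict of lists, then replays each array independently with only a running total (capacity derived in closed form via bit_length), instead of A's single interleaved pass over a dict of mutable [count, capacity] pairs with a doubling while-loop and a three-way new/realloc/no-realloc branch.
-- outside the precondition, e.g. on solution([[1, 8], [1, -7], [1, 3]]): A returns 0, B returns 1; on solution([[1]]): A raises ValueError, B raises ValueError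
import Mathlib
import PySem

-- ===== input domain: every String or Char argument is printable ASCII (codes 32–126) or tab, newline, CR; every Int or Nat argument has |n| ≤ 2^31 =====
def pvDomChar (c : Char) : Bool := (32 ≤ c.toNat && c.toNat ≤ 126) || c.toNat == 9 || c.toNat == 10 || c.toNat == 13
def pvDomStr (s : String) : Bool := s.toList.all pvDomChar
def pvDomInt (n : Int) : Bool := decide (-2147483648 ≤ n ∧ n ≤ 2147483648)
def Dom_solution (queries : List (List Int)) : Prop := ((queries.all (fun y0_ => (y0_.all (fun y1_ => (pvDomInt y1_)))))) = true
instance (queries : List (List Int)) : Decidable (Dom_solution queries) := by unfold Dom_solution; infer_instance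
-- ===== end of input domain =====

-- B regroups the queries per array number in a first pass, then replays each array
-- independently keeping only its running total (capacity derived in closed form via
-- bit_length) instead of A's single pass over a dict of mutable [count, capacity] pairs;
-- objective: alternative (staged grouping decomposition, same cost).


-- ===== PORT A =====
-- the 'new_arr_size = 1; while target > new_arr_size: new_arr_size *= 2' loop
-- (the '1 ≤ cap' conjunct is a totality guard only; A always starts the loop at cap = 1)
def growA (t : Int) (cap : Int) : Int :=
  if 1 ≤ cap ∧ cap < t then growA t (2 * cap) else cap
termination_by (t - cap).toNat
decreasing_by omega

def stepA (s : Int × PySem.Dict Int (Int × Int)) (q : List Int) : Int × PySem.Dict Int (Int × Int) :=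
  match q with
  | [arr_num, add_cnt] =>
    match s.2.get? arr_num with
    | some (element, max_array) =>
      if element + add_cnt > max_array then
        (s.1 + element, s.2.insert arr_num (element + add_cnt, growA (element + add_cnt) 1))
      else
        (s.1, s.2.insert arr_num (element + add_cnt, max_array))
    | none => (s.1, s.2.insert arr_num (add_cnt, growA add_cnt 1))
  | _ => s  -- unpacking raises ValueError in Python: excluded by Pre_solution

def solution (queries : List (List Int)) : Int :=
  (queries.foldl stepA (0, PySem.Dict.empty)).1

-- ===== PORT B =====
-- stage 1: groups.setdefault(arr_num, []).append(add_cnt)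
def groupStepB (d : PySem.Dict Int (List Int)) (q : List Int) : PySem.Dict Int (List Int) :=
  match q with
  | [arr_num, add_cnt] => d.modify arr_num [] (· ++ [add_cnt])
  | _ => d  -- unpacking raises ValueError in Python: excluded by Pre_solution

-- 1 << max(total - 1, 0).bit_length()
def capB (t : Int) : Int := (1 : Int) <<< PySem.Int.bitLength (max (t - 1) 0)

-- inner loop body: state (answer, total)
def stepK (s : Int × Int) (a : Int) : Int × Int :=
  ((if s.2 + a > capB s.2 then s.1 + s.2 else s.1), s.2 + a)

def solution_alt (queries : List (List Int)) : Int :=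
  ((queries.foldl groupStepB PySem.Dict.empty).values).foldl
    (fun ans adds => (adds.foldl stepK (ans, 0)).1) 0

-- ===== PRECONDITION & SPEC =====
-- Pre_ restricts to the task's natural domain: every query is a [arr_num, add_cnt] pair (anything
-- else makes both Pythons' tuple unpacking raise ValueError) with a non-negative element count
-- add_cnt (on a negative count A keeps the old, now oversized, capacity while B re-derives it
-- from the shrunken count, so the two differ there; negative counts are outside the problem's domain).
def Pre_solution (queries : List (List Int)) : Prop :=
  ∀ q ∈ queries, q.length = 2 ∧ 0 ≤ q.getD 1 0
instance (queries : List (List Int)) : Decidable (Pre_solution queries) := by unfold Pre_solution; infer_instance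

def pvWitness_solution : List (List Int) := [[1, 3], [2, 5], [1, 2]]

def Spec_solution (queries : List (List Int)) (out : Int) : Prop := out = solution_alt queries
instance (queries : List (List Int)) (out : Int) : Decidable (Spec_solution queries out) := by unfold Spec_solution; infer_instance

-- ===== CLAIM (what is proved, stated in full; the proofs are below) =====
def Claim_equal_solution : Prop := ∀ (queries : List (List Int)), Dom_solution queries → Pre_solution queries → Spec_solution queries (solution queries)

-- ===== LEMMAS AND PROOFS =====

theorem growA_le (t cap : Int) : 1 ≤ cap → t ≤ growA t cap := by
  induction cap using growA.induct t with
  | case1 c hg ih => intro _; rw [growA, if_pos hg]; exact ih (by omega)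
  | case2 c hg => intro h; rw [growA, if_neg hg]; omega

theorem growA_pow (t : Int) (cap : Int) : ∀ k : Nat, cap = 2 ^ k → ∃ m : Nat, k ≤ m ∧ growA t cap = 2 ^ m := by
  induction cap using growA.induct t with
  | case1 c hg ih =>
    intro k hk
    rw [growA, if_pos hg]
    obtain ⟨m, hm, he⟩ := ih (k + 1) (by rw [hk]; ring)
    exact ⟨m, by omega, he⟩
  | case2 c hg => intro k hk; rw [growA, if_neg hg]; exact ⟨k, le_refl _, hk⟩

theorem growA_le_pow (t : Int) (cap : Int) (m : Nat) (ht : t ≤ 2 ^ m) :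
    ∀ k : Nat, cap = 2 ^ k → k ≤ m → growA t cap ≤ 2 ^ m := by
  induction cap using growA.induct t with
  | case1 c hg ih =>
    intro k hk hkm
    rw [growA, if_pos hg]
    have hlt : (2 : Int) ^ k < 2 ^ m := by omega
    have : k < m := by
      by_contra hc
      have : (2 : Int) ^ m ≤ 2 ^ k := pow_le_pow_right₀ (by norm_num) (by omega)
      omega
    exact ih (k + 1) (by rw [hk]; ring) (by omega)
  | case2 c hg =>
    intro k hk hkm
    rw [growA, if_neg hg, hk]
    exact pow_le_pow_right₀ (by norm_num) hkm

theorem capB_eq_growA (n : Int) : capB n = growA n 1 := by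
  by_cases h1 : n ≤ 1
  · have hm : max (n - 1) 0 = 0 := by omega
    rw [capB, hm, growA, if_neg (by omega)]
    decide
  · have hm : max (n - 1) 0 = n - 1 := by omega
    rw [capB, hm, Int.shiftLeft_eq, one_mul]
    set s := PySem.Int.bitLength (n - 1) with hs
    have hne : n - 1 ≠ 0 := by omega
    have hlo : 2 ^ (s - 1) ≤ (n - 1).natAbs := PySem.Int.two_pow_bitLength_le (n - 1) hne
    have hhi : (n - 1).natAbs < 2 ^ s := PySem.Int.lt_two_pow_bitLength (n - 1)
    have habs : ((n - 1).natAbs : Int) = n - 1 := Int.natAbs_of_nonneg (by omega)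
    have hloZ : (2 : Int) ^ (s - 1) ≤ n - 1 := by
      calc (2 : Int) ^ (s - 1) = ((2 ^ (s - 1) : Nat) : Int) := by push_cast; ring
        _ ≤ ((n - 1).natAbs : Int) := by exact_mod_cast hlo
        _ = n - 1 := habs
    have hhiZ : n - 1 < (2 : Int) ^ s := by
      calc n - 1 = ((n - 1).natAbs : Int) := habs.symm
        _ < ((2 ^ s : Nat) : Int) := by exact_mod_cast hhi
        _ = (2 : Int) ^ s := by push_cast; ring
    have hs1 : 1 ≤ s := by
      by_contra hc
      have : s = 0 := by omega
      rw [this] at hhiZ; simp at hhiZ; omega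
    obtain ⟨m, _, hm⟩ := growA_pow n 1 0 (by norm_num)
    have hle : growA n 1 ≤ 2 ^ s := growA_le_pow n 1 s (by omega) 0 (by norm_num) (by omega)
    have hge : n ≤ growA n 1 := growA_le n 1 (by norm_num)
    have hms : s ≤ m := by
      by_contra hc
      have : (2 : Int) ^ m ≤ 2 ^ (s - 1) := pow_le_pow_right₀ (by norm_num) (by omega)
      omega
    have : (2 : Int) ^ s ≤ 2 ^ m := pow_le_pow_right₀ (by norm_num) hms
    omega

theorem growA_mono (x y : Int) (h : x ≤ y) : growA x 1 ≤ growA y 1 := by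
  obtain ⟨m, _, hm⟩ := growA_pow y 1 0 (by norm_num)
  have := growA_le y 1 (by norm_num)
  exact le_trans (growA_le_pow x 1 m (by omega) 0 (by norm_num) (by norm_num)) (by omega)

theorem growA_stable (c add : Int) (hadd : 0 ≤ add) (hle : c + add ≤ growA c 1) :
    growA (c + add) 1 = growA c 1 := by
  obtain ⟨m, _, hm⟩ := growA_pow c 1 0 (by norm_num)
  have h1 : growA (c + add) 1 ≤ 2 ^ m := growA_le_pow (c + add) 1 m (by omega) 0 (by norm_num) (by omega)
  have h2 : growA c 1 ≤ growA (c + add) 1 := growA_mono c (c + add) (by omega)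
  omega

-- per-key contribution of a full add list, replayed from total 0
def contribK (adds : List Int) : Int := (adds.foldl stepK (0, 0)).1

theorem foldl_stepK_snd (adds : List Int) (s t : Int) :
    (adds.foldl stepK (s, t)).2 = t + adds.sum := by
  induction adds generalizing s t with
  | nil => simp
  | cons a r ih => simp only [List.foldl_cons, stepK, ih, List.sum_cons]; ring

theorem foldl_stepK_shift (adds : List Int) (s t : Int) :
    (adds.foldl stepK (s, t)).1 = s + (adds.foldl stepK (0, t)).1 := by
  induction adds generalizing s t with
  | nil => simp
  | cons a r ih =>
    simp only [List.foldl_cons, stepK]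
    rw [ih, ih ((if t + a > capB t then 0 + t else 0)) (t + a)]
    split_ifs <;> ring

theorem contribK_snoc (l : List Int) (a : Int) :
    contribK (l ++ [a]) = contribK l + (if l.sum + a > capB l.sum then l.sum else 0) := by
  unfold contribK
  rw [List.foldl_append]
  have h2 := foldl_stepK_snd l 0 0
  simp only [List.foldl_cons, List.foldl_nil, stepK]
  rw [foldl_stepK_shift] at *
  simp only [zero_add] at *
  rw [h2]
  split_ifs <;> ring

-- sum of per-key contributions over a grouping dict
def SgB (G : PySem.Dict Int (List Int)) : Int := (G.values.map contribK).sum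

theorem foldl_inner_eq (vals : List (List Int)) (s : Int) :
    vals.foldl (fun ans adds => (adds.foldl stepK (ans, 0)).1) s
      = s + (vals.map contribK).sum := by
  induction vals generalizing s with
  | nil => simp
  | cons v r ih =>
    simp only [List.foldl_cons, List.map_cons, List.sum_cons]
    rw [ih, foldl_stepK_shift]
    show s + contribK v + _ = _
    ring

theorem sum_map_update (l : List (Int × List Int)) (k : Int) (v w : List Int)
    (hnd : (l.map (·.1)).Nodup) (hmem : (k, w) ∈ l) :
    ((l.map (fun p => if p.1 == k then (k, v) else p)).map (fun p => contribK p.2)).sum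
      = (l.map (fun p => contribK p.2)).sum + contribK v - contribK w := by
  induction l with
  | nil => simp at hmem
  | cons p r ih =>
    simp only [List.map_cons, List.nodup_cons, List.mem_map] at hnd
    simp only [List.map_cons, List.sum_cons]
    rcases List.mem_cons.mp hmem with hh | hmem'
    · have hk : p.1 = k := (congrArg Prod.fst hh).symm
      have hpw : p.2 = w := (congrArg Prod.snd hh).symm
      have hrid : r.map (fun p => if p.1 == k then (k, v) else p) = r := by
        have hfix : ∀ q ∈ r, (fun p => if p.1 == k then (k, v) else p) q = id q := by
          intro q hq
          have hne : q.1 ≠ k := fun he => hnd.1 ⟨q, hq, he.trans hk.symm⟩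
          simp [hne]
        rw [List.map_congr_left hfix, List.map_id]
      rw [if_pos (by simp [hk]), hrid, hpw]
      show contribK v + _ = _
      ring
    · have hk : p.1 ≠ k := by
        intro he
        rcases List.mem_cons.mp hmem with hh | hm
        · exact hnd.1 ⟨(k, w), hmem', by simp [he]⟩
        · exact hnd.1 ⟨(k, w), hm, by simp [he]⟩
      rw [if_neg (by simp [hk]), ih hnd.2 hmem']
      ring

theorem SgB_items (d : PySem.Dict Int (List Int)) :
    SgB d = (d.items.map (fun p => contribK p.2)).sum := by
  simp only [SgB, PySem.Dict.values, List.map_map]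
  rfl

theorem SgB_modify (G : PySem.Dict Int (List Int)) (hnd : G.keys.Nodup) (k a : Int) :
    SgB (G.modify k [] (· ++ [a]))
      = SgB G + contribK (G.getD k [] ++ [a]) - contribK (G.getD k []) := by
  have hm : G.modify k [] (· ++ [a]) = G.insert k (G.getD k [] ++ [a]) := rfl
  rw [hm, SgB_items, SgB_items]
  by_cases hc : G.contains k
  · obtain ⟨w, hw⟩ : ∃ w, G.get? k = some w := by
      have hh := PySem.Dict.contains_eq_isSome_get? G k
      rw [hc] at hh
      exact Option.isSome_iff_exists.mp hh.symm
    have hwD : G.getD k [] = w := PySem.Dict.getD_of_get?_eq_some G [] hw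
    have hmem := PySem.Dict.mem_items_of_get?_eq_some G hw
    rw [PySem.Dict.items_insert_of_contains G _ hc]
    rw [sum_map_update G.items k _ w hnd hmem, hwD]
  · have hcf : G.contains k = false := by simpa using hc
    have hD : G.getD k [] = [] := PySem.Dict.getD_of_not_contains G [] hcf
    rw [PySem.Dict.items_insert_of_not_contains G _ hcf]
    rw [List.map_append, List.sum_append, hD]
    simp [contribK]

theorem main_fold (qs : List (List Int))
    (hpre : ∀ q ∈ qs, q.length = 2 ∧ 0 ≤ q.getD 1 0) :
    ∀ (ans : Int) (dA : PySem.Dict Int (Int × Int)) (G : PySem.Dict Int (List Int)),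
    G.keys.Nodup →
    (∀ k, dA.get? k = (if (G.getD k []) = [] then none
        else some ((G.getD k []).sum, growA (G.getD k []).sum 1))) →
    ans = SgB G →
    (qs.foldl stepA (ans, dA)).1 = SgB (qs.foldl groupStepB G) := by
  induction qs with
  | nil => intro ans dA G _ _ hans; simpa using hans
  | cons q qs ih =>
    intro ans dA G hnd hrel hans
    obtain ⟨hlen, hnn⟩ := hpre q (by simp)
    obtain ⟨k, b, rfl⟩ : ∃ k b, q = [k, b] := by
      match q, hlen with
      | [k, b], _ => exact ⟨k, b, rfl⟩
    simp only [List.getD_cons_succ, List.getD_cons_zero] at hnn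
    have hpre' : ∀ q ∈ qs, q.length = 2 ∧ 0 ≤ q.getD 1 0 := fun q hq => hpre q (by simp [hq])
    set l := G.getD k [] with hl
    have hG' : groupStepB G [k, b] = G.modify k [] (· ++ [b]) := rfl
    have hndG' : (G.modify k [] (· ++ [b])).keys.Nodup := by
      have hm : G.modify k [] (· ++ [b]) = G.insert k (l ++ [b]) := rfl
      rw [hm]; exact PySem.Dict.nodup_keys_insert _ _ _ hnd
    have hgetG' : ∀ k', (G.modify k [] (· ++ [b])).getD k' []
        = if k' = k then l ++ [b] else G.getD k' [] := by
      intro k'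
      by_cases h : k' = k
      · subst h; rw [PySem.Dict.getD_modify_self, if_pos rfl, ← hl]
      · rw [PySem.Dict.getD_modify_of_ne G [] _ h, if_neg h]
    have hSg := SgB_modify G hnd k b
    have hsnoc := contribK_snoc l b
    rw [capB_eq_growA] at hsnoc
    have hrelStep : ∀ (tot cp : Int), cp = growA (l ++ [b]).sum 1 →
        (∀ k', (dA.insert k ((l ++ [b]).sum, cp)).get? k'
          = (if ((G.modify k [] (· ++ [b])).getD k' []) = [] then none
             else some (((G.modify k [] (· ++ [b])).getD k' []).sum,
                        growA ((G.modify k [] (· ++ [b])).getD k' []).sum 1))) := by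
      intro tot cp hcp k'
      rw [PySem.Dict.get?_insert, hgetG' k']
      by_cases h : k' = k
      · simp [h, hcp]
      · simp only [h]
        exact hrel k'
    cases hcase : l with
    | nil =>
      have hA : dA.get? k = none := by rw [hrel k, ← hl, hcase]; simp
      have hstep : stepA (ans, dA) [k, b] = (ans, dA.insert k (b, growA b 1)) := by
        simp [stepA, hA]
      have hsum : (l ++ [b]).sum = b := by rw [hcase]; simp
      have hcontrib0 : contribK (l ++ [b]) = contribK l := by
        rw [hsnoc, hcase]
        simp only [List.sum_nil]
        split_ifs <;> ring
      simp only [List.foldl_cons]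
      rw [hstep, hG']
      refine ih hpre' ans _ _ hndG' ?_ ?_
      · have := hrelStep b (growA b 1) (by rw [hsum])
        simpa [hsum] using this
      · rw [hSg, hcontrib0, ← hans]; ring
    | cons x r =>
      have hne : l ≠ [] := by rw [hcase]; simp
      set c := l.sum with hc
      have hA : dA.get? k = some (c, growA c 1) := by rw [hrel k, ← hl, if_neg hne]
      have hsum : (l ++ [b]).sum = c + b := by simp [hc]
      by_cases hcond : c + b > growA c 1
      · have hstep : stepA (ans, dA) [k, b] = (ans + c, dA.insert k (c + b, growA (c + b) 1)) := by
          simp [stepA, hA, hcond]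
        have hcontrib : contribK (l ++ [b]) = contribK l + c := by
          rw [hsnoc, if_pos hcond]
        simp only [List.foldl_cons]
        rw [hstep, hG']
        refine ih hpre' (ans + c) _ _ hndG' ?_ ?_
        · have := hrelStep (c + b) (growA (c + b) 1) (by rw [hsum])
          simpa [hsum] using this
        · rw [hSg, hcontrib, ← hans]; ring
      · have hstab : growA (c + b) 1 = growA c 1 := growA_stable c b hnn (by omega)
        have hstep : stepA (ans, dA) [k, b] = (ans, dA.insert k (c + b, growA c 1)) := by
          simp only [stepA, hA]
          rw [if_neg (by omega)]
        have hcontrib : contribK (l ++ [b]) = contribK l := by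
          rw [hsnoc, if_neg (by omega)]; ring
        simp only [List.foldl_cons]
        rw [hstep, hG']
        refine ih hpre' ans _ _ hndG' ?_ ?_
        · have := hrelStep (c + b) (growA c 1) (by rw [hsum, hstab])
          simpa [hsum] using this
        · rw [hSg, hcontrib, ← hans]; ring

-- ===== VERDICT (by name: the statement is the Claim_ definition above) =====
theorem solution_spec : Claim_equal_solution := by
  intro queries _ hpre
  unfold Spec_solution solution solution_alt
  rw [foldl_inner_eq]
  have := main_fold queries hpre 0 PySem.Dict.empty PySem.Dict.empty
    (by simp [PySem.Dict.keys, PySem.Dict.empty])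
    (by intro k; simp [PySem.Dict.get?_empty, PySem.Dict.getD_empty])
    (by simp [SgB, PySem.Dict.empty])
  rw [this]
  show SgB _ = 0 + (_ : List _).sum
  simp [SgB]
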